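-- pv_equiv track=rewrite | github.com/bebetterest/OpenCompanyMini | src/opm_train/orchestrator_agents.py | _order_actions_for_execution
-- ===== SOURCE A (Python) =====
-- from typing import Any
--
-- def _order_actions_for_execution(actions: list[dict[str, Any]]) -> list[dict[str, Any]]:
--     """Execute compress/finish at the end of each action batch."""
--     ordered: list[dict[str, Any]] = []
--     deferred_compress: list[dict[str, Any]] = []
--     deferred_finish: list[dict[str, Any]] = []
--     for action in actions:
--         action_type = str(action.get("type", "")).strip()
--         if action_type == "compress_context":
--             deferred_compress.append(action)
--             continue
--         if action_type == "finish":
--             deferred_finish.append(action)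
--             continue
--         ordered.append(action)
--     return [*ordered, *deferred_compress, *deferred_finish]
-- ===== SOURCE B (Python) =====
-- def _order_actions_for_execution(actions):
--     """Execute compress/finish at the end of each action batch."""
--     def rank(action):
--         action_type = str(action.get("type", "")).strip()
--         if action_type == "compress_context":
--             return 1
--         if action_type == "finish":
--             return 2
--         return 0
--     return sorted(actions, key=rank)
-- ===== Notes on version B (the rewrite author's own statement) =====
-- stated objective: idiomatic
-- what changed: Replaces the three-bucket partition with accumulator lists by a single stable sort keyed by a computed rank (0 = ordinary, 1 = compress_context, 2 = finish), relying on sort stability to preserve in-bucket order.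
import Mathlib
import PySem

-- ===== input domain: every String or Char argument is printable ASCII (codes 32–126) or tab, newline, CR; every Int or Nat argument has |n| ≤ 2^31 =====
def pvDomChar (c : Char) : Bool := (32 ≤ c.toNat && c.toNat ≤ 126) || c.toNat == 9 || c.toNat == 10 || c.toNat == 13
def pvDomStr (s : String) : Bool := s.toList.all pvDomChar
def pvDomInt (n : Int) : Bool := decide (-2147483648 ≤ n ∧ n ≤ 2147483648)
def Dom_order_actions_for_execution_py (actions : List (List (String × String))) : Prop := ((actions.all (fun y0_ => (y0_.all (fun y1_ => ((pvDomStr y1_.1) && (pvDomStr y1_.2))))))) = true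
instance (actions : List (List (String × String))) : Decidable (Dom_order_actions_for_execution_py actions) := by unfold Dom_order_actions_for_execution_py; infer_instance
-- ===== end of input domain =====

-- B replaces A's three-bucket partition by one stable sort on a computed rank (idiomatic, not faster).


-- ===== PORT A =====
-- one pass over the actions maintaining the three accumulator lists (ordered, deferred_compress, deferred_finish)
def order_actions_for_execution_py (actions : List (List (String × String))) : List (List (String × String)) :=
  let s := actions.foldl
    (fun (st : List (List (String × String)) × List (List (String × String)) × List (List (String × String))) action =>
      let action_type := PySem.Str.strip ((PySem.Dict.mk action).getD "type" "")
      if action_type = "compress_context" then (st.1, st.2.1 ++ [action], st.2.2)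
      else if action_type = "finish" then (st.1, st.2.1, st.2.2 ++ [action])
      else (st.1 ++ [action], st.2.1, st.2.2))
    ([], [], [])
  s.1 ++ s.2.1 ++ s.2.2

-- ===== PORT B =====
-- rank key: 1 for compress_context, 2 for finish, 0 otherwise
def pvRank (action : List (String × String)) : Int :=
  let action_type := PySem.Str.strip ((PySem.Dict.mk action).getD "type" "")
  if action_type = "compress_context" then 1
  else if action_type = "finish" then 2
  else 0

def order_actions_for_execution_py_alt (actions : List (List (String × String))) : List (List (String × String)) :=
  PySem.List.sorted actions pvRank

-- ===== PRECONDITION & SPEC =====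
def Spec_order_actions_for_execution_py (actions : List (List (String × String))) (out : List (List (String × String))) : Prop := out = order_actions_for_execution_py_alt actions
instance (actions : List (List (String × String))) (out : List (List (String × String))) : Decidable (Spec_order_actions_for_execution_py actions out) := by unfold Spec_order_actions_for_execution_py; infer_instance

-- ===== CLAIM (what is proved, stated in full; the proofs are below) =====
def Claim_equal_order_actions_for_execution_py : Prop := ∀ (actions : List (List (String × String))), Dom_order_actions_for_execution_py actions → Spec_order_actions_for_execution_py actions (order_actions_for_execution_py actions)

-- ===== LEMMAS AND PROOFS =====

-- inserting x into A ++ B where nothing in A is strictly greater-keyed than x and everything in B is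
theorem insertBy_append {α : Type} (key : α → Int) (x : α) (A B : List α)
    (hA : ∀ a ∈ A, ¬ key x < key a) (hB : ∀ b ∈ B, key x < key b) :
    PySem.List.insertBy (fun a b => decide (key a < key b)) x (A ++ B) = A ++ x :: B := by
  induction A with
  | nil =>
    cases B with
    | nil => rfl
    | cons b bs =>
      simp only [List.nil_append, PySem.List.insertBy]
      rw [if_pos]
      simpa using hB b (by simp)
  | cons a as ih =>
    simp only [List.cons_append, PySem.List.insertBy]
    rw [if_neg (by simpa using hA a (by simp)),
        ih (fun a ha => hA a (by simp [ha]))]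

-- A's loop appends each element to the bucket selected by its rank
theorem loopA_eq (xs : List (List (String × String)))
    (o c f : List (List (String × String))) :
    xs.foldl
      (fun (st : List (List (String × String)) × List (List (String × String)) × List (List (String × String))) action =>
        let action_type := PySem.Str.strip ((PySem.Dict.mk action).getD "type" "")
        if action_type = "compress_context" then (st.1, st.2.1 ++ [action], st.2.2)
        else if action_type = "finish" then (st.1, st.2.1, st.2.2 ++ [action])
        else (st.1 ++ [action], st.2.1, st.2.2))
      (o, c, f)
    = (o ++ xs.filter (fun a => pvRank a == 0),
       c ++ xs.filter (fun a => pvRank a == 1),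
       f ++ xs.filter (fun a => pvRank a == 2)) := by
  induction xs generalizing o c f with
  | nil => simp
  | cons x xs ih =>
    simp only [List.foldl_cons, List.filter_cons]
    by_cases h1 : PySem.Str.strip ((PySem.Dict.mk x).getD "type" "") = "compress_context"
    · simp [h1, pvRank, ih]
    · by_cases h2 : PySem.Str.strip ((PySem.Dict.mk x).getD "type" "") = "finish"
      · simp [h2, pvRank, ih]
      · simp [h1, h2, pvRank, ih]

-- B's insertion sort keeps the three rank classes as contiguous stable blocks
theorem loopB_eq (xs : List (List (String × String)))
    (B0 B1 B2 : List (List (String × String)))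
    (h0 : ∀ a ∈ B0, pvRank a = 0) (h1 : ∀ a ∈ B1, pvRank a = 1) (h2 : ∀ a ∈ B2, pvRank a = 2) :
    xs.foldl (fun acc x => PySem.List.insertBy (fun a b => decide (pvRank a < pvRank b)) x acc)
      (B0 ++ B1 ++ B2)
    = (B0 ++ xs.filter (fun a => pvRank a == 0))
      ++ (B1 ++ xs.filter (fun a => pvRank a == 1))
      ++ (B2 ++ xs.filter (fun a => pvRank a == 2)) := by
  induction xs generalizing B0 B1 B2 with
  | nil => simp
  | cons x xs ih =>
    have hr : pvRank x = 0 ∨ pvRank x = 1 ∨ pvRank x = 2 := by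
      simp only [pvRank]; split_ifs <;> simp
    simp only [List.foldl_cons, List.filter_cons]
    rcases hr with hx | hx | hx
    · have hins : PySem.List.insertBy (fun a b => decide (pvRank a < pvRank b)) x (B0 ++ (B1 ++ B2))
          = B0 ++ x :: (B1 ++ B2) := by
        apply insertBy_append pvRank x B0 (B1 ++ B2)
        · intro a ha; rw [hx, h0 a ha]; omega
        · intro b hb; rw [hx]
          rcases List.mem_append.mp hb with h | h
          · rw [h1 b h]; omega
          · rw [h2 b h]; omega
      rw [List.append_assoc, hins]
      have step := ih (B0 ++ [x]) B1 B2
        (by intro a ha; rcases List.mem_append.mp ha with h | h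
            · exact h0 a h
            · simp at h; subst h; exact hx) h1 h2
      simpa [hx] using step
    · have hins : PySem.List.insertBy (fun a b => decide (pvRank a < pvRank b)) x ((B0 ++ B1) ++ B2)
          = (B0 ++ B1) ++ x :: B2 := by
        apply insertBy_append pvRank x (B0 ++ B1) B2
        · intro a ha; rw [hx]
          rcases List.mem_append.mp ha with h | h
          · rw [h0 a h]; omega
          · rw [h1 a h]; omega
        · intro b hb; rw [hx, h2 b hb]; omega
      rw [hins]
      have step := ih B0 (B1 ++ [x]) B2 h0
        (by intro a ha; rcases List.mem_append.mp ha with h | h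
            · exact h1 a h
            · simp at h; subst h; exact hx) h2
      simpa [hx] using step
    · have hins : PySem.List.insertBy (fun a b => decide (pvRank a < pvRank b)) x ((B0 ++ B1 ++ B2) ++ [])
          = (B0 ++ B1 ++ B2) ++ [x] := by
        apply insertBy_append pvRank x (B0 ++ B1 ++ B2) []
        · intro a ha; rw [hx]
          rcases List.mem_append.mp ha with h | h
          · rcases List.mem_append.mp h with h' | h'
            · rw [h0 a h']; omega
            · rw [h1 a h']; omega
          · rw [h2 a h]; omega
        · intro b hb; simp at hb
      rw [show B0 ++ B1 ++ B2 = (B0 ++ B1 ++ B2) ++ [] by simp, hins]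
      have step := ih B0 B1 (B2 ++ [x]) h0 h1
        (by intro a ha; rcases List.mem_append.mp ha with h | h
            · exact h2 a h
            · simp at h; subst h; exact hx)
      simpa [hx] using step

-- ===== VERDICT (by name: the statement is the Claim_ definition above) =====
theorem order_actions_for_execution_py_spec : Claim_equal_order_actions_for_execution_py := by
  intro actions _
  unfold Spec_order_actions_for_execution_py order_actions_for_execution_py order_actions_for_execution_py_alt PySem.List.sorted
  simp only [if_neg (by decide : ¬ (false = true))]
  rw [loopA_eq actions [] [] []]
  have := loopB_eq actions [] [] [] (by simp) (by simp) (by simp)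
  simp only [List.nil_append, List.append_nil] at this ⊢
  rw [this]
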